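-- pv_equiv track=rewrite | github.com/vedanth-raj/R-A | error_handler.py | _simplified_section_detection
-- ===== SOURCE A (Python) =====
-- def _simplified_section_detection(text: str) -> bool:
--     """Simplified section detection."""
--     try:
--         # Basic section detection without complex patterns
--         lines = text.split('\n')
--         sections_found = 0
--
--         for line in lines:
--             line_lower = line.lower().strip()
--             if any(keyword in line_lower for keyword in ['abstract', 'introduction', 'conclusion']):
--                 sections_found += 1
--
--         return sections_found > 0
--     except Exception:
--         return False
-- ===== SOURCE B (Python) =====
-- def _simplified_section_detection(text: str) -> bool:
--     """Simplified section detection."""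
--     try:
--         lowered = text.lower()
--         return any(kw in lowered for kw in ['abstract', 'introduction', 'conclusion'])
--     except Exception:
--         return False
-- ===== Notes on version B (the rewrite author's own statement) =====
-- stated objective: simpler
-- what changed: Replaces the per-line split/strip/counter loop with a single whole-text lowercase-and-substring test, valid because the keywords contain no newline or whitespace.
import Mathlib
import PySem

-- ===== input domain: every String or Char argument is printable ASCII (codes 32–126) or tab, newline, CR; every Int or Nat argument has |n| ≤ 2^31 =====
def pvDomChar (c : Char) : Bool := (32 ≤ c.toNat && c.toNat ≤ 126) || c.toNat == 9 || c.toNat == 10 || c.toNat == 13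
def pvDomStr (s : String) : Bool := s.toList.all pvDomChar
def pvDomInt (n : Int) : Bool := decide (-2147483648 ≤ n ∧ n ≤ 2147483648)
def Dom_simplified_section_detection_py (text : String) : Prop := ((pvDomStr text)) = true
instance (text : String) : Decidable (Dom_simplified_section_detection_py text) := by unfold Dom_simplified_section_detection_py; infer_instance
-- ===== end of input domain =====

-- B drops the per-line split/strip/counter loop: it lowercases the whole text once and tests the
-- three keywords as substrings of it (objective: simpler).

-- ===== PORT A =====
-- A: split on '\n', count lines whose lower().strip() contains a keyword, return count > 0.
def simplified_section_detection_py (text : String) : Bool :=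
  let lines : List String := (PySem.Str.split? text "\n").getD []
  let sections_found : Nat :=
    lines.foldl (fun n line =>
      if (["abstract", "introduction", "conclusion"]).any
           (fun kw => PySem.Str.isIn kw (PySem.Str.strip (PySem.Str.lower line)))
      then n + 1 else n) 0
  sections_found > 0

-- ===== PORT B =====
def simplified_section_detection_py_alt (text : String) : Bool :=
  let lowered := PySem.Str.lower text
  (["abstract", "introduction", "conclusion"]).any (fun kw => PySem.Str.isIn kw lowered)

-- ===== PRECONDITION & SPEC =====
def Spec_simplified_section_detection_py (text : String) (out : Bool) : Prop := out = simplified_section_detection_py_alt text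
instance (text : String) (out : Bool) : Decidable (Spec_simplified_section_detection_py text out) := by unfold Spec_simplified_section_detection_py; infer_instance

-- ===== CLAIM (what is proved, stated in full; the proofs are below) =====
def Claim_equal_simplified_section_detection_py : Prop := ∀ (text : String), Dom_simplified_section_detection_py text → Spec_simplified_section_detection_py text (simplified_section_detection_py text)

-- ===== LEMMAS AND PROOFS =====

-- a structural recursion computing Python's split on the single character '\n'
def mySplit : List Char → List (List Char)
  | [] => [[]]
  | c :: rest =>
      if c = '\n' then [] :: mySplit rest
      else (c :: (mySplit rest).headI) :: (mySplit rest).tail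

theorem mySplit_ne_nil (l : List Char) : mySplit l ≠ [] := by
  cases l with
  | nil => simp [mySplit]
  | cons c rest => by_cases h : c = '\n' <;> simp [mySplit, h]

theorem mySplit_head (l : List Char) :
    (mySplit l).headI = l.takeWhile (fun c => !(c == '\n')) := by
  induction l with
  | nil => simp [mySplit]
  | cons c rest ih =>
    by_cases h : c = '\n' <;> simp [mySplit, h, ih]

theorem headI_cons_tail {α : Type} [Inhabited α] (l : List α) (h : l ≠ []) :
    l.headI :: l.tail = l := by
  cases l with
  | nil => exact absurd rfl h
  | cons a t => rfl

theorem splitOn_go_eq (l : List Char) : ∀ (fuel : Nat), l.length ≤ fuel →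
    ∀ (cur : List Char) (acc : List (List Char)),
    PySem.Chars.splitOn.go ['\n'] fuel l cur acc
      = acc.reverse ++ ((cur.reverse ++ (mySplit l).headI) :: (mySplit l).tail) := by
  induction l with
  | nil =>
    intro fuel _ cur acc
    cases fuel <;> simp [PySem.Chars.splitOn.go, mySplit]
  | cons c rest ih =>
    intro fuel hf cur acc
    cases fuel with
    | zero => simp at hf
    | succ k =>
      by_cases h : c = '\n'
      · subst h
        have : List.isPrefixOf ['\n'] ('\n' :: rest) = true := by
          simp [List.isPrefixOf]
        rw [show PySem.Chars.splitOn.go ['\n'] (k+1) ('\n' :: rest) cur acc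
              = PySem.Chars.splitOn.go ['\n'] k rest [] (cur.reverse :: acc) by
            simp [PySem.Chars.splitOn.go, this]]
        have h2 : mySplit ('\n' :: rest) = [] :: mySplit rest := by simp [mySplit]
        rw [ih k (by simpa using hf) [] (cur.reverse :: acc), h2]
        simp [headI_cons_tail _ (mySplit_ne_nil rest)]
      · have hpre : List.isPrefixOf ['\n'] (c :: rest) = false := by
          simp [List.isPrefixOf]
          intro hc; exact absurd hc.symm h
        rw [show PySem.Chars.splitOn.go ['\n'] (k+1) (c :: rest) cur acc
              = PySem.Chars.splitOn.go ['\n'] k rest (c :: cur) acc by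
            simp [PySem.Chars.splitOn.go, hpre]]
        rw [ih k (by simpa using hf) (c :: cur) acc]
        simp [mySplit, h]

theorem splitOn_eq_mySplit (cs : List Char) :
    PySem.Chars.splitOn cs ['\n'] = mySplit cs := by
  have h := splitOn_go_eq cs (cs.length + 1) (by omega) [] []
  simpa [PySem.Chars.splitOn, headI_cons_tail _ (mySplit_ne_nil cs)] using h

-- a nonempty keyword without '\n' appears in cs iff it appears in some line of mySplit cs
theorem prefix_takeWhile {kw l : List Char} (hnl : '\n' ∉ kw) (h : kw <+: l) :
    kw <+: l.takeWhile (fun c => !(c == '\n')) := by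
  induction kw generalizing l with
  | nil => exact List.nil_prefix
  | cons k kw' ih =>
    cases l with
    | nil => simp at h
    | cons c r =>
      rw [List.cons_prefix_cons] at h
      obtain ⟨rfl, h'⟩ := h
      have hk : ¬ (k = '\n') := fun hc => hnl (hc ▸ List.mem_cons_self ..)
      simp only [List.takeWhile_cons]
      simp only [List.mem_cons, not_or] at hnl
      simp [hk, List.cons_prefix_cons, ih hnl.2 h']

theorem infix_mySplit_iff {kw : List Char} (hne : kw ≠ []) (hnl : '\n' ∉ kw)
    (cs : List Char) : kw <:+: cs ↔ ∃ l ∈ mySplit cs, kw <:+: l := by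
  induction cs with
  | nil =>
    simp only [mySplit, List.mem_singleton, List.infix_nil]
    constructor
    · intro h; exact absurd h hne
    · rintro ⟨l, rfl, h⟩; exact absurd (List.infix_nil.mp h) hne
  | cons c rest ih =>
    by_cases h : c = '\n'
    · subst h
      have hsp : mySplit ('\n' :: rest) = [] :: mySplit rest := by simp [mySplit]
      rw [hsp, List.infix_cons_iff]
      constructor
      · rintro (hp | hi)
        · cases kw with
          | nil => exact absurd rfl hne
          | cons k kw' =>
            rw [List.cons_prefix_cons] at hp
            exact absurd hp.1 (fun hc => hnl (hc ▸ List.mem_cons_self ..))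
        · obtain ⟨l, hl, hkl⟩ := ih.mp hi
          exact ⟨l, List.mem_cons_of_mem _ hl, hkl⟩
      · rintro ⟨l, hl, hkl⟩
        rw [List.mem_cons] at hl
        rcases hl with rfl | hl
        · exact absurd (List.infix_nil.mp hkl) hne
        · exact Or.inr (ih.mpr ⟨l, hl, hkl⟩)
    · have hsp : mySplit (c :: rest)
          = (c :: (mySplit rest).headI) :: (mySplit rest).tail := by
        simp [mySplit, h]
      have hheadpre : (mySplit rest).headI <+: rest := by
        rw [mySplit_head]; exact List.takeWhile_prefix _
      rw [hsp, List.infix_cons_iff]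
      constructor
      · rintro (hp | hi)
        · cases kw with
          | nil => exact absurd rfl hne
          | cons k kw' =>
            rw [List.cons_prefix_cons] at hp
            obtain ⟨rfl, h'⟩ := hp
            simp only [List.mem_cons, not_or] at hnl
            refine ⟨k :: (mySplit rest).headI, List.mem_cons_self .., ?_⟩
            refine (List.cons_prefix_cons.mpr ⟨rfl, ?_⟩).isInfix
            rw [mySplit_head]
            exact prefix_takeWhile hnl.2 h'
        · obtain ⟨l, hl, hkl⟩ := ih.mp hi
          rw [← headI_cons_tail _ (mySplit_ne_nil rest), List.mem_cons] at hl
          rcases hl with rfl | hl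
          · exact ⟨c :: (mySplit rest).headI, List.mem_cons_self ..,
              hkl.trans (List.suffix_cons c _).isInfix⟩
          · exact ⟨l, List.mem_cons_of_mem _ hl, hkl⟩
      · rintro ⟨l, hl, hkl⟩
        rw [List.mem_cons] at hl
        rcases hl with rfl | hl
        · rcases List.infix_cons_iff.mp hkl with hp | hi
          · have hpre : (c :: (mySplit rest).headI) <+: (c :: rest) :=
              List.cons_prefix_cons.mpr ⟨rfl, hheadpre⟩
            exact Or.inl (hp.trans hpre)
          · exact Or.inr (hi.trans hheadpre.isInfix)
        · have hkr : kw <:+: rest := ih.mpr ⟨l, by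
            rw [← headI_cons_tail _ (mySplit_ne_nil rest)]
            exact List.mem_cons_of_mem _ hl, hkl⟩
          exact Or.inr hkr

-- stripping whitespace does not affect presence of a nonempty all-non-space keyword
theorem infix_dropWhile_iff {kw : List Char} (hne : kw ≠ [])
    (hsp : ∀ c ∈ kw, PySem.Chars.isspace c = false) (l : List Char) :
    kw <:+: l ↔ kw <:+: (l.dropWhile PySem.Chars.isspace) := by
  constructor
  · intro h
    induction l with
    | nil => simpa using h
    | cons c r ih =>
      by_cases hc : PySem.Chars.isspace c = true
      · rw [List.dropWhile_cons_of_pos hc]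
        rcases List.infix_cons_iff.mp h with hp | hi
        · cases kw with
          | nil => exact absurd rfl hne
          | cons k kw' =>
            rw [List.cons_prefix_cons] at hp
            have := hsp k (List.mem_cons_self ..)
            rw [hp.1] at this; rw [this] at hc; exact absurd hc (by simp)
        · exact ih hi
      · rw [List.dropWhile_cons_of_neg hc]; exact h
  · intro h
    exact h.trans (List.dropWhile_suffix _).isInfix

theorem infix_strip_iff {kw : List Char} (hne : kw ≠ [])
    (hsp : ∀ c ∈ kw, PySem.Chars.isspace c = false) (l : List Char) :
    kw <:+: l ↔ kw <:+: PySem.Chars.strip l := by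
  have hne' : kw.reverse ≠ [] := by simpa using hne
  have hsp' : ∀ c ∈ kw.reverse, PySem.Chars.isspace c = false :=
    fun c hc => hsp c (List.mem_reverse.mp hc)
  rw [PySem.Chars.strip, PySem.Chars.lstrip, PySem.Chars.rstrip]
  rw [infix_dropWhile_iff hne hsp l]
  constructor
  · intro h
    have h1 : kw.reverse <:+: (List.dropWhile PySem.Chars.isspace l).reverse :=
      List.reverse_infix.mpr h
    have h2 := (infix_dropWhile_iff hne' hsp' _).mp h1
    simpa using List.reverse_infix.mpr h2
  · intro h
    have h2 : kw.reverse <:+: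
        List.dropWhile PySem.Chars.isspace (List.dropWhile PySem.Chars.isspace l).reverse := by
      simpa using List.reverse_infix.mpr h
    have h1 := (infix_dropWhile_iff hne' hsp' _).mpr h2
    simpa using List.reverse_infix.mpr h1

-- lowercasing commutes with splitting on '\n'
theorem lowerChar_eq_nl_iff (c : Char) : PySem.Chars.lowerChar c = '\n' ↔ c = '\n' := by
  simp only [PySem.Chars.lowerChar, PySem.Chars.isupper]
  split_ifs with h
  · simp only [Bool.and_eq_true, decide_eq_true_eq] at h
    rw [Char.le_def] at h
    obtain ⟨h1, h2⟩ := h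
    have h1' : 65 ≤ c.toNat := h1
    have h2' : c.toNat ≤ 90 := h2
    constructor
    · intro hc
      have hv : (Char.ofNat (c.toNat + 32)).toNat = c.toNat + 32 := by
        rw [Char.toNat_ofNat, if_pos (Or.inl (by omega))]
      rw [hc] at hv
      have h10 : ('\n' : Char).toNat = 10 := rfl
      omega
    · intro hc
      subst hc
      simp at h1'
  · exact Iff.rfl

theorem mySplit_lower (cs : List Char) :
    mySplit (PySem.Chars.lower cs) = (mySplit cs).map PySem.Chars.lower := by
  induction cs with
  | nil => simp [mySplit, PySem.Chars.lower]
  | cons c rest ih =>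
    simp only [PySem.Chars.lower, List.map_cons] at ih ⊢
    by_cases h : c = '\n'
    · subst h
      rw [show PySem.Chars.lowerChar '\n' = '\n' from (lowerChar_eq_nl_iff '\n').mpr rfl]
      simp [mySplit, ih, PySem.Chars.lower]
    · have h' : ¬ (PySem.Chars.lowerChar c = '\n') := fun hc => h ((lowerChar_eq_nl_iff c).mp hc)
      simp only [mySplit, if_neg h', if_neg h, ih]
      cases hq : mySplit rest with
      | nil => exact absurd hq (mySplit_ne_nil rest)
      | cons p ps => simp [PySem.Chars.lower]

-- the counting fold equals countP
theorem foldl_count {α : Type} (p : α → Bool) (l : List α) : ∀ (n : Nat),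
    l.foldl (fun n x => if p x then n + 1 else n) n = n + l.countP p := by
  induction l with
  | nil => simp
  | cons x xs ih =>
    intro n
    by_cases h : p x
    · simp [List.foldl_cons, h, ih, Nat.add_assoc, Nat.add_comm 1]
    · simp [List.foldl_cons, h, ih]

-- facts about the three keyword literals
theorem kw_facts : ∀ kw ∈ (["abstract", "introduction", "conclusion"] : List String),
    kw.toList ≠ [] ∧ '\n' ∉ kw.toList ∧ ∀ c ∈ kw.toList, PySem.Chars.isspace c = false := by
  intro kw hkw
  simp only [List.mem_cons, List.not_mem_nil, or_false] at hkw
  rcases hkw with rfl | rfl | rfl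
  · have ht : "abstract".toList = ['a','b','s','t','r','a','c','t'] := rfl
    exact ⟨by rw [ht]; simp, by rw [ht]; decide, by rw [ht]; simp [PySem.Chars.isspace]⟩
  · have ht : "introduction".toList = ['i','n','t','r','o','d','u','c','t','i','o','n'] := rfl
    exact ⟨by rw [ht]; simp, by rw [ht]; decide, by rw [ht]; simp [PySem.Chars.isspace]⟩
  · have ht : "conclusion".toList = ['c','o','n','c','l','u','s','i','o','n'] := rfl
    exact ⟨by rw [ht]; simp, by rw [ht]; decide, by rw [ht]; simp [PySem.Chars.isspace]⟩

-- one keyword: B's whole-text test equals A's per-line test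
theorem keyword_line_iff (kw : String) (hkw : kw ∈ ["abstract", "introduction", "conclusion"])
    (cs : List Char) :
    PySem.Chars.isIn kw.toList (PySem.Chars.lower cs) = true
      ↔ ∃ l ∈ mySplit cs,
          PySem.Chars.isIn kw.toList (PySem.Chars.strip (PySem.Chars.lower l)) = true := by
  obtain ⟨hne, hnl, hsp⟩ := kw_facts kw hkw
  rw [PySem.Chars.isIn_iff_infix]
  rw [infix_mySplit_iff hne hnl (PySem.Chars.lower cs), mySplit_lower]
  constructor
  · rintro ⟨l', hl', hkl⟩
    obtain ⟨l, hl, rfl⟩ := List.mem_map.mp hl'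
    exact ⟨l, hl, (PySem.Chars.isIn_iff_infix ..).mpr
      ((infix_strip_iff hne hsp _).mp hkl)⟩
  · rintro ⟨l, hl, hkl⟩
    rw [PySem.Chars.isIn_iff_infix] at hkl
    exact ⟨PySem.Chars.lower l, List.mem_map_of_mem hl,
      (infix_strip_iff hne hsp _).mpr hkl⟩

-- ===== VERDICT (by name: the statement is the Claim_ definition above) =====
theorem simplified_section_detection_py_spec : Claim_equal_simplified_section_detection_py := by
  intro text _
  unfold Spec_simplified_section_detection_py
  unfold simplified_section_detection_py simplified_section_detection_py_alt
  have hsep : ("\n" : String).toList = ['\n'] := rfl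
  simp only [PySem.Str.split?, PySem.Chars.split?, hsep, List.isEmpty_cons,
    Bool.false_eq_true, if_false, Option.map_some, Option.getD_some]
  rw [splitOn_eq_mySplit, foldl_count]
  simp only [Nat.zero_add]
  rw [Bool.eq_iff_iff, decide_eq_true_iff, gt_iff_lt, List.countP_pos_iff, List.any_eq_true]
  constructor
  · rintro ⟨lineS, hmem, hline⟩
    obtain ⟨l, hl, rfl⟩ := List.mem_map.mp hmem
    rw [List.any_eq_true] at hline
    obtain ⟨kw, hkw, hktrue⟩ := hline
    refine ⟨kw, hkw, ?_⟩
    simp only [PySem.Str.isIn_eq, PySem.Str.toList_lower, PySem.Str.toList_strip,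
      String.toList_ofList] at hktrue ⊢
    exact (keyword_line_iff kw hkw text.toList).mpr ⟨l, hl, hktrue⟩
  · rintro ⟨kw, hkw, hktrue⟩
    simp only [PySem.Str.isIn_eq, PySem.Str.toList_lower] at hktrue
    obtain ⟨l, hl, hkl⟩ := (keyword_line_iff kw hkw text.toList).mp hktrue
    refine ⟨String.ofList l, List.mem_map_of_mem hl, ?_⟩
    rw [List.any_eq_true]
    refine ⟨kw, hkw, ?_⟩
    simp only [PySem.Str.isIn_eq, PySem.Str.toList_lower, PySem.Str.toList_strip,
      String.toList_ofList]
    exact hkl
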